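-- pv_equiv track=rewrite | github.com/erikbr01/policy_doctor | policy_doctor/data/path_utils.py | get_train_dir_for_seed
-- ===== SOURCE A (Python) =====
-- def get_train_dir_for_seed(train_dir: str, seed: str, reference_seed: str) -> str:
--     """Derive train_dir path for a given seed from the reference train_dir.
--
--     Same logic as get_eval_dir_for_seed but for train_dir (e.g. .../square_mh_0 -> .../square_mh_1).
--     """
--     if seed == reference_seed:
--         return train_dir
--     path = train_dir.rstrip("/")
--     parts = path.split("/")
--     suffix = "_" + reference_seed
--     for i in range(len(parts) - 1, -1, -1):
--         if parts[i].endswith(suffix):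
--             parts[i] = parts[i][: -len(suffix)] + "_" + seed
--             return "/".join(parts)
--     return train_dir
-- ===== SOURCE B (Python) =====
-- def get_train_dir_for_seed(train_dir: str, seed: str, reference_seed: str) -> str:
--     """Rewrite the last segment ending in '_' + reference_seed by peeling segments off
--     the right with rpartition and accumulating the untouched tail, instead of splitting
--     the whole path into a parts list, index-scanning it backwards and re-joining."""
--     if seed == reference_seed:
--         return train_dir
--     suffix = "_" + reference_seed
--     head = train_dir.rstrip("/")
--     tail_acc = ""
--     while True:
--         head, sep, last = head.rpartition("/")
--         if last.endswith(suffix):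
--             return head + sep + last[: len(last) - len(suffix)] + "_" + seed + tail_acc
--         if not sep:
--             return train_dir
--         tail_acc = sep + last + tail_acc
-- ===== Notes on version B (the rewrite author's own statement) =====
-- stated objective: alternative
-- what changed: B never builds a parts list: it peels segments off the right of the path with rpartition in a while loop, accumulating the untouched tail, and splices the replacement into the string directly, instead of splitting into a list, scanning it backwards by index and re-joining.
import Mathlib
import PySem

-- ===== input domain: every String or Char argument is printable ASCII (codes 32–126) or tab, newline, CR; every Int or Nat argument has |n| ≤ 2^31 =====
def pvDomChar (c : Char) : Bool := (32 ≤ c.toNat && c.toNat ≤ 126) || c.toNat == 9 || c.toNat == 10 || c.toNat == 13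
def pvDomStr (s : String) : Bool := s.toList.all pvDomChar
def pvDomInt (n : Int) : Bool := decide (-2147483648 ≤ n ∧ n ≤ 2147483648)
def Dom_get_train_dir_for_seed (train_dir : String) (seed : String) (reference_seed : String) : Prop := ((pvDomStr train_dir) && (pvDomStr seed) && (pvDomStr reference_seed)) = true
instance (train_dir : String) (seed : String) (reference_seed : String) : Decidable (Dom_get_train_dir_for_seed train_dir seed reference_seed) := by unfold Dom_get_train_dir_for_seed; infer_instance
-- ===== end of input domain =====

-- ===== PORT A =====
-- B peels segments off the right with rpartition and accumulates the untouched tail, never building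
-- a parts list (objective: alternative). Return values only; neither program mutates its arguments.

-- Python `s.rstrip("/")`: drop trailing '/' characters (exact; shared verbatim by both Pythons).
def pyRstripSlash (cs : List Char) : List Char := (cs.reverse.dropWhile (· == '/')).reverse

-- A's loop `for i in range(len(parts)-1, -1, -1)`: counter n+1 means current index i = n; 0 = loop exhausted.
-- `parts[i][:-len(suffix)]` = take (length - len(suffix)) (exact: Python x[:-k] with k ≥ 1).
def loopA (suf rep : List Char) (parts : List (List Char)) : Nat → Option (List Char)
  | 0 => none
  | n+1 =>
    let p := parts.getD n []
    if PySem.Chars.endswith p suf then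
      some (PySem.Chars.join ['/'] (parts.set n (p.take (p.length - suf.length) ++ rep)))
    else loopA suf rep parts n

def get_train_dir_for_seed (train_dir : String) (seed : String) (reference_seed : String) : String :=
  if seed == reference_seed then train_dir
  else
    let path := pyRstripSlash train_dir.toList
    let parts := PySem.Chars.splitOn path ['/']
    match loopA ('_' :: reference_seed.toList) ('_' :: seed.toList) parts parts.length with
    | some r => String.ofList r
    | none => train_dir

-- ===== PORT B =====
-- B's `while True` loop with `head, sep, last = head.rpartition("/")` and accumulator `tail_acc`.
-- rpartition: `last` = chars after the final '/' (all of head if none); `sep` is [] iff no '/' in head,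
-- i.e. iff last.length = head.length; `head` becomes the part before the final '/', which is
-- head.take (head.length - last.length - 1) (Nat subtraction gives take 0 = [] = Python's "" when no sep).
-- `last[: len(last) - len(suffix)]` = take (length - length); the `return` values are spliced strings.
def replLoop (suf rep : List Char) (head acc : List Char) : Option (List Char) :=
  let last := (head.reverse.takeWhile (· != '/')).reverse
  let hd := head.take (head.length - last.length - 1)
  let sep : List Char := if last.length = head.length then [] else ['/']
  if PySem.Chars.endswith last suf then
    some (hd ++ sep ++ last.take (last.length - suf.length) ++ rep ++ acc)
  else if h : last.length = head.length then none
  else replLoop suf rep hd (sep ++ last ++ acc)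
  termination_by head.length
  decreasing_by
    have hle : (List.takeWhile (fun x => x != '/') head.reverse).length ≤ head.length := by
      simpa using (List.takeWhile_prefix (l := head.reverse) (p := fun x => x != '/')).length_le
    have h' : ¬ (List.takeWhile (fun x => x != '/') head.reverse).length = head.length := by
      simpa [last] using h
    simp only [List.length_take, List.length_reverse]
    omega

def get_train_dir_for_seed_alt (train_dir : String) (seed : String) (reference_seed : String) : String :=
  if seed == reference_seed then train_dir
  else
    match replLoop ('_' :: reference_seed.toList) ('_' :: seed.toList)
        (pyRstripSlash train_dir.toList) [] with
    | some r => String.ofList r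
    | none => train_dir

-- ===== PRECONDITION & SPEC =====
def Spec_get_train_dir_for_seed (train_dir : String) (seed : String) (reference_seed : String) (out : String) : Prop := out = get_train_dir_for_seed_alt train_dir seed reference_seed
instance (train_dir : String) (seed : String) (reference_seed : String) (out : String) : Decidable (Spec_get_train_dir_for_seed train_dir seed reference_seed out) := by unfold Spec_get_train_dir_for_seed; infer_instance

-- ===== CLAIM (what is proved, stated in full; the proofs are below) =====
def Claim_equal_get_train_dir_for_seed : Prop := ∀ (train_dir : String) (seed : String) (reference_seed : String), Dom_get_train_dir_for_seed train_dir seed reference_seed → Spec_get_train_dir_for_seed train_dir seed reference_seed (get_train_dir_for_seed train_dir seed reference_seed)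

-- ===== LEMMAS AND PROOFS =====

def ssplit : List Char → List (List Char)
  | [] => [[]]
  | c :: rest => if c = '/' then [] :: ssplit rest else (ssplit rest).modifyHead (c :: ·)

theorem ssplit_ne_nil (cs : List Char) : ssplit cs ≠ [] := by
  induction cs with
  | nil => simp [ssplit]
  | cons c rest ih =>
    simp only [ssplit]
    split
    · simp
    · cases h : ssplit rest with
      | nil => exact absurd h ih
      | cons a l => simp [List.modifyHead]

theorem splitOn_go_ssplit : ∀ (fuel : Nat) (l cur : List Char) (acc : List (List Char)),
    l.length < fuel →
    PySem.Chars.splitOn.go ['/'] fuel l cur acc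
      = acc.reverse ++ (ssplit l).modifyHead (cur.reverse ++ ·) := by
  intro fuel
  induction fuel with
  | zero => intro l cur acc h; omega
  | succ n ih =>
    intro l cur acc h
    cases l with
    | nil =>
      simp [PySem.Chars.splitOn.go, ssplit, List.modifyHead]
    | cons c rest =>
      rw [PySem.Chars.splitOn.go]
      by_cases hc : c = '/'
      · subst hc
        have hpre : List.isPrefixOf ['/'] ('/' :: rest) = true := by simp [List.isPrefixOf]
        simp only [hpre, if_pos]
        rw [ih _ _ _ (by simpa using Nat.lt_of_succ_lt_succ h)]
        simp [ssplit, List.modifyHead]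
        cases ssplit rest <;> rfl
      · have hpre : List.isPrefixOf ['/'] (c :: rest) = false := by
          simp [List.isPrefixOf]; exact fun hh => absurd hh.symm hc
        simp only [hpre, Bool.false_eq_true, if_false]
        rw [ih _ _ _ (by simpa using Nat.lt_of_succ_lt_succ h)]
        have hne := ssplit_ne_nil rest
        cases hs : ssplit rest with
        | nil => exact absurd hs hne
        | cons a t =>
          simp [ssplit, hc, hs, List.modifyHead]

theorem splitOn_eq_ssplit (cs : List Char) : PySem.Chars.splitOn cs ['/'] = ssplit cs := by
  rw [PySem.Chars.splitOn, splitOn_go_ssplit _ _ _ _ (by omega)]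
  have := ssplit_ne_nil cs
  cases h : ssplit cs with
  | nil => exact absurd h this
  | cons a t => simp [List.modifyHead]

theorem ssplit_append (a b : List Char) : ssplit (a ++ '/' :: b) = ssplit a ++ ssplit b := by
  induction a with
  | nil => simp [ssplit]
  | cons c rest ih =>
    by_cases hc : c = '/'
    · subst hc; simp [ssplit, ih]
    · simp only [List.cons_append, ssplit, hc, if_false, ih]
      have hne := ssplit_ne_nil rest
      cases hs : ssplit rest with
      | nil => exact absurd hs hne
      | cons x t => simp [List.modifyHead]

theorem ssplit_no_slash {b : List Char} (h : '/' ∉ b) : ssplit b = [b] := by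
  induction b with
  | nil => rfl
  | cons c rest ih =>
    have hc : c ≠ '/' := fun hh => h (hh ▸ List.mem_cons_self ..)
    simp [ssplit, hc, ih (fun hm => h (List.mem_cons_of_mem _ hm)), List.modifyHead]

theorem join_ssplit (a : List Char) : PySem.Chars.join ['/'] (ssplit a) = a := by
  induction a with
  | nil => simp [ssplit, PySem.Chars.join, List.intercalate]
  | cons c rest ih =>
    by_cases hc : c = '/'
    · subst hc
      simp only [ssplit, reduceIte]
      have hne := ssplit_ne_nil rest
      cases hs : ssplit rest with
      | nil => exact absurd hs hne
      | cons x t =>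
        rw [hs] at ih
        simp_all [PySem.Chars.join, List.intercalate]
    · simp only [ssplit, hc, if_false]
      have hne := ssplit_ne_nil rest
      cases hs : ssplit rest with
      | nil => exact absurd hs hne
      | cons x t =>
        rw [hs] at ih
        cases t with
        | nil => simp_all [PySem.Chars.join, List.intercalate, List.modifyHead]
        | cons y u => simp_all [PySem.Chars.join, List.intercalate, List.modifyHead]

theorem join_append_last (xs : List (List Char)) (hx : xs ≠ []) (b : List Char) :
    PySem.Chars.join ['/'] (xs ++ [b]) = PySem.Chars.join ['/'] xs ++ '/' :: b := by
  induction xs with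
  | nil => exact absurd rfl hx
  | cons x t ih =>
    cases t with
    | nil => simp [PySem.Chars.join, List.intercalate]
    | cons y u =>
      have := ih (by simp)
      simp_all [PySem.Chars.join, List.intercalate]

theorem exists_last_slash {cs : List Char} (h : '/' ∈ cs) :
    ∃ a b, cs = a ++ '/' :: b ∧ '/' ∉ b := by
  induction cs with
  | nil => simp at h
  | cons c rest ih =>
    by_cases hr : '/' ∈ rest
    · obtain ⟨a, b, hab, hb⟩ := ih hr
      exact ⟨c :: a, b, by simp [hab], hb⟩
    · have hc : c = '/' := by
        rcases List.mem_cons.1 h with h1 | h2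
        · exact h1.symm
        · exact absurd h2 hr
      exact ⟨[], rest, by simp [hc], hr⟩

theorem loopA_append (suf rep : List Char) (pa : List (List Char)) (hpa : pa ≠ []) (b : List Char) :
    ∀ n, n ≤ pa.length →
    loopA suf rep (pa ++ [b]) n = (loopA suf rep pa n).map (· ++ '/' :: b) := by
  intro n
  induction n with
  | zero => intro _; simp [loopA]
  | succ m ih =>
    intro hm
    have hlt : m < pa.length := by omega
    have hget : (pa ++ [b]).getD m [] = pa.getD m [] := by
      rw [List.getD_append _ _ _ _ hlt]
    rw [loopA, loopA]
    simp only [hget]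
    split
    · have hset : (pa ++ [b]).set m ((pa.getD m []).take ((pa.getD m []).length - suf.length) ++ rep)
          = pa.set m ((pa.getD m []).take ((pa.getD m []).length - suf.length) ++ rep) ++ [b] := by
        rw [List.set_append_left (h := hlt)]
      rw [hset, join_append_last _ (by simpa using hpa)]
      rfl
    · exact ih (by omega)

theorem takeWhile_append_stop {p : Char → Bool} (l1 : List Char) (c : Char) (l2 : List Char)
    (h1 : ∀ x ∈ l1, p x = true) (hc : p c = false) :
    (l1 ++ c :: l2).takeWhile p = l1 := by
  induction l1 with
  | nil => simp [hc]
  | cons x t ih =>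
    have hx := h1 x (List.mem_cons_self ..)
    simp [hx, ih (fun y hy => h1 y (List.mem_cons_of_mem _ hy))]

theorem last_of_append {a b : List Char} (hb : '/' ∉ b) :
    ((a ++ '/' :: b).reverse.takeWhile (· != '/')).reverse = b := by
  have : (a ++ '/' :: b).reverse = b.reverse ++ '/' :: a.reverse := by simp
  rw [this, takeWhile_append_stop _ _ _ ?_ (by decide), List.reverse_reverse]
  intro x hx
  have hxb : x ∈ b := List.mem_reverse.1 hx
  have hne : x ≠ '/' := fun hxe => hb (hxe ▸ hxb)
  simpa using hne

theorem last_no_slash {b : List Char} (hb : '/' ∉ b) :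
    (b.reverse.takeWhile (· != '/')).reverse = b := by
  have : b.reverse.takeWhile (· != '/') = b.reverse ++ ([] : List Char) := by
    rw [List.append_nil, List.takeWhile_eq_self_iff.2]
    intro x hx
    have hxb : x ∈ b := List.mem_reverse.1 hx
    have hne : x ≠ '/' := fun hxe => hb (hxe ▸ hxb)
    simpa using hne
  rw [this, List.append_nil, List.reverse_reverse]

theorem main_loop (suf rep : List Char) :
    ∀ head acc, replLoop suf rep head acc
      = (loopA suf rep (ssplit head) (ssplit head).length).map (· ++ acc) := by
  have key : ∀ n head acc, head.length ≤ n →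
      replLoop suf rep head acc
        = (loopA suf rep (ssplit head) (ssplit head).length).map (· ++ acc) := by
    intro n
    induction n using Nat.strong_induction_on with
    | _ n ih =>
      intro head acc hlen
      by_cases hmem : '/' ∈ head
      · obtain ⟨a, b, rfl, hb⟩ := exists_last_slash hmem
        have hsplit : ssplit (a ++ '/' :: b) = ssplit a ++ [b] := by
          rw [ssplit_append, ssplit_no_slash hb]
        set pa := ssplit a with hpa
        have hpane : pa ≠ [] := ssplit_ne_nil a
        have hlast : ((a ++ '/' :: b).reverse.takeWhile (· != '/')).reverse = b :=
          last_of_append hb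
        have hlencs : (a ++ '/' :: b).length = a.length + 1 + b.length := by simp; omega
        have hlne : ¬ (b.length = (a ++ '/' :: b).length) := by omega
        have hhd : (a ++ '/' :: b).take ((a ++ '/' :: b).length - b.length - 1) = a := by
          have : (a ++ '/' :: b).length - b.length - 1 = a.length := by omega
          rw [this, List.take_left']
          rfl
        rw [replLoop.eq_def]
        simp only [hlast, hhd, hlne, if_false]
        -- A side, one step
        have hlenp : (ssplit (a ++ '/' :: b)).length = pa.length + 1 := by rw [hsplit]; simp
        rw [hlenp, hsplit, loopA]
        have hgetb : (pa ++ [b]).getD pa.length [] = b := by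
          rw [List.getD_append_right _ _ _ _ (le_refl _)]; simp
        simp only [hgetb]
        by_cases hif : PySem.Chars.endswith b suf = true
        · rw [if_pos hif, if_pos hif]
          have hset : (pa ++ [b]).set pa.length (b.take (b.length - suf.length) ++ rep)
              = pa ++ [b.take (b.length - suf.length) ++ rep] := by
            rw [List.set_append_right _ _ (le_refl _)]
            simp
          rw [hset, join_append_last pa hpane, hpa, join_ssplit]
          simp [Option.map]
        · rw [if_neg hif, if_neg hif]
          simp only [dif_neg not_false, List.cons_append, List.nil_append]
          rw [loopA_append suf rep pa hpane b pa.length (le_refl _),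
            ih a.length (by omega) a ('/' :: (b ++ acc)) (le_refl _), ← hpa]
          cases loopA suf rep pa pa.length <;> simp
      · have hsplit : ssplit head = [head] := ssplit_no_slash hmem
        have hlast : (head.reverse.takeWhile (· != '/')).reverse = head := last_no_slash hmem
        rw [replLoop.eq_def]
        simp only [hlast]
        rw [hsplit, show ([head] : List (List Char)).length = 0 + 1 from rfl, loopA]
        have hget : ([head] : List (List Char)).getD 0 [] = head := rfl
        simp only [hget]
        by_cases hif : PySem.Chars.endswith head suf = true
        · rw [if_pos hif, if_pos hif]
          have h1 : head.length - head.length - 1 = 0 := by omega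
          rw [h1]
          simp [PySem.Chars.join, List.intercalate, Option.map]
        · rw [if_neg hif, if_neg hif, dif_pos trivial]
          rfl
  intro head acc; exact key head.length head acc (le_refl _)

-- ===== VERDICT (by name: the statement is the Claim_ definition above) =====
theorem get_train_dir_for_seed_spec : Claim_equal_get_train_dir_for_seed := by
  intro train_dir seed reference_seed _
  unfold Spec_get_train_dir_for_seed get_train_dir_for_seed get_train_dir_for_seed_alt
  by_cases hseed : (seed == reference_seed) = true
  · simp [hseed]
  · have hseed' : (seed == reference_seed) = false := by simpa using hseed
    simp only [hseed', Bool.false_eq_true, if_false]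
    rw [splitOn_eq_ssplit, main_loop]
    cases loopA ('_' :: reference_seed.toList) ('_' :: seed.toList)
        (ssplit (pyRstripSlash train_dir.toList)) (ssplit (pyRstripSlash train_dir.toList)).length
      <;> simp
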